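-- pv_equiv track=rewrite | github.com/wawiorka/HomeWorksTMS | Hw-ki/HW13/hw13_2.py | gen_func
-- ===== SOURCE A (Python) =====
-- def gen_func(finish):
--     a = 1
--     k = 0
--     while k <= finish:
--         yield a
--         a += 1
--         k += 1
--         if k % 3 == 0:
--             a = 1
--             yield a
--             a += 1
--             k += 1
-- ===== SOURCE B (Python) =====
-- def gen_func(finish):
--     # total count N: smallest k > finish with k % 3 != 0 (0 if finish < 0); then emit the 1,2,3 cycle
--     if finish >= 0:
--         n = finish + 2 if finish % 3 == 2 else finish + 1
--         for i in range(n):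
--             yield i % 3 + 1
-- ===== Notes on version B (the rewrite author's own statement) =====
-- stated objective: simpler
-- what changed: Replaced the stateful two-counter loop with resets by a count-then-emit form: the total yield count equals the smallest k > finish with k % 3 != 0, and output position i always holds i % 3 + 1.
import Mathlib
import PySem

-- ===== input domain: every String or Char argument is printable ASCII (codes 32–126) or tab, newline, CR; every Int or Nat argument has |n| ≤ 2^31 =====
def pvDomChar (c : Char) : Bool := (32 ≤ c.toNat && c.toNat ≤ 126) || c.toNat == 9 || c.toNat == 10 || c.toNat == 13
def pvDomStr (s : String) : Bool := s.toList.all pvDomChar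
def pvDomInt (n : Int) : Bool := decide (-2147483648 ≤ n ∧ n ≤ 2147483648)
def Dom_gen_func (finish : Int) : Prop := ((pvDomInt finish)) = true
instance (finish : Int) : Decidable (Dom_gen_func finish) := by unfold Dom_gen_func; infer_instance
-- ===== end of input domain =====

-- B replaces A's stateful two-counter/reset loop by a count-then-emit form (same cost; objective: simpler).

-- ===== PORT A =====
-- the while loop: state (a, k); each yield appends to the output list
def gen_funcLoop (finish a k : Int) : List Int :=
  if k ≤ finish then
    if PySem.Int.mod (k + 1) 3 == 0 then
      -- yield a; a+=1; k+=1; then k%3==0: a=1; yield a; a+=1; k+=1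
      a :: 1 :: gen_funcLoop finish 2 (k + 2)
    else
      a :: gen_funcLoop finish (a + 1) (k + 1)
  else []
termination_by (finish + 1 - k).toNat
decreasing_by all_goals omega

def gen_func (finish : Int) : List Int := gen_funcLoop finish 1 0

-- ===== PORT B =====
def gen_func_alt (finish : Int) : List Int :=
  if finish ≥ 0 then
    let n : Int := if PySem.Int.mod finish 3 == 2 then finish + 2 else finish + 1
    (PySem.List.pyRange 0 n 1).map (fun i => PySem.Int.mod i 3 + 1)
  else []

-- ===== PRECONDITION & SPEC =====
def Spec_gen_func (finish : Int) (out : List Int) : Prop := out = gen_func_alt finish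
instance (finish : Int) (out : List Int) : Decidable (Spec_gen_func finish out) := by unfold Spec_gen_func; infer_instance

-- ===== CLAIM (what is proved, stated in full; the proofs are below) =====
def Claim_equal_gen_func : Prop := ∀ (finish : Int), Dom_gen_func finish → Spec_gen_func finish (gen_func finish)

-- ===== LEMMAS AND PROOFS =====

theorem pvMod3 (x : Int) : PySem.Int.mod x 3 = x % 3 :=
  PySem.Int.mod_eq_emod_of_pos (by norm_num)

-- stopping point of the loop, seen from state k: smallest walk value > finish
def pvT (finish k : Int) : Int :=
  if finish < k then k
  else if (finish + 1) % 3 = 0 then finish + 2 else finish + 1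

-- loop invariant: from state (k % 3 + 1, k) the loop emits j % 3 + 1 for each walk value j in [k, pvT finish k)
theorem pvLoop_eq (finish : Int) (k : Int) (hk : 0 ≤ k) :
    gen_funcLoop finish (k % 3 + 1) k =
      (PySem.List.pyRange k (pvT finish k) 1).map (fun j => PySem.Int.mod j 3 + 1) := by
  generalize hn : (finish + 1 - k).toNat = n
  induction n using Nat.strong_induction_on generalizing k with
  | _ n ih =>
    rw [gen_funcLoop]
    by_cases hle : k ≤ finish
    · simp only [hle, if_true, pvMod3]
      have hT : pvT finish k = if (finish + 1) % 3 = 0 then finish + 2 else finish + 1 := by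
        unfold pvT; rw [if_neg (by omega)]
      by_cases h3 : (k + 1) % 3 = 0
      · simp only [h3, beq_self_eq_true, if_true]
        have h2 : (k + 2) % 3 + 1 = 2 := by omega
        have hrec := ih (finish + 1 - (k + 2)).toNat (by omega) (k + 2) (by omega) rfl
        rw [h2] at hrec
        rw [hrec]
        have hT2 : pvT finish (k + 2) = pvT finish k := by
          unfold pvT; split_ifs <;> omega
        have hkT : k < pvT finish k := by rw [hT]; split_ifs <;> omega
        have hkT2 : k + 1 < pvT finish k := by rw [hT]; split_ifs <;> omega
        rw [hT2, PySem.List.pyRange_one_cons hkT, PySem.List.pyRange_one_cons hkT2,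
          List.map_cons, List.map_cons]
        simp only [pvMod3]
        have h11 : (k + 1) % 3 + 1 = 1 := by omega
        rw [h11, show k + 1 + 1 = k + 2 from by ring]
      · simp only [beq_iff_eq, h3, if_false]
        have h1 : k % 3 + 1 + 1 = (k + 1) % 3 + 1 := by omega
        have hrec := ih (finish + 1 - (k + 1)).toNat (by omega) (k + 1) (by omega) rfl
        rw [h1, hrec]
        have hT1 : pvT finish (k + 1) = pvT finish k := by
          unfold pvT; split_ifs <;> omega
        have hkT : k < pvT finish k := by rw [hT]; split_ifs <;> omega
        rw [hT1, PySem.List.pyRange_one_cons hkT, List.map_cons]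
        simp only [pvMod3]
    · simp only [hle, if_false]
      have : pvT finish k = k := by unfold pvT; rw [if_pos (by omega)]
      rw [this, PySem.List.pyRange_one_eq_nil le_rfl, List.map_nil]

-- ===== VERDICT (by name: the statement is the Claim_ definition above) =====
theorem gen_func_spec : Claim_equal_gen_func := by
  intro finish _
  unfold Spec_gen_func gen_func gen_func_alt
  have h := pvLoop_eq finish 0 le_rfl
  norm_num at h
  rw [h]
  by_cases h0 : finish ≥ 0
  · simp only [h0, if_true, pvMod3]
    have : pvT finish 0 = if finish % 3 = 2 then finish + 2 else finish + 1 := by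
      unfold pvT; rw [if_neg (by omega)]; split_ifs <;> omega
    rw [this]
    simp only [beq_iff_eq]
  · simp only [h0, if_false]
    have : pvT finish 0 = 0 := by unfold pvT; rw [if_pos (by omega)]
    rw [this, PySem.List.pyRange_one_eq_nil le_rfl, List.map_nil]
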